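-- pv_equiv track=rewrite | github.com/breakwa11/gfw_whitelist | list_gfw.py | obfs
-- ===== SOURCE A (Python) =====
-- def obfs(url):
-- 	ret = ''
-- 	index = 0
-- 	for c in url:
-- 		if index > 0 and ( c == '.' or (index % 7) == 3 ):
-- 			last = ord(ret[-1])
-- 			ret = "%s\\x%x" % (ret[:-1], last)
-- 		ret += c
-- 		index += 1
-- 	return ret
-- ===== SOURCE B (Python) =====
-- def obfs(url):
--     # Deferred emission: each character is held as `prev` until the next one
--     # is seen, which decides whether `prev` is emitted raw or hex-escaped;
--     # parts are joined once at the end (no backpatching of the output string).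
--     parts = []
--     prev = None
--     j = 0
--     for c in url:
--         if prev is not None:
--             if c == '.' or j % 7 == 3:
--                 parts.append("\\x%x" % ord(prev))
--             else:
--                 parts.append(prev)
--         prev = c
--         j += 1
--     if prev is not None:
--         parts.append(prev)
--     return ''.join(parts)
-- ===== Notes on version B (the rewrite author's own statement) =====
-- stated objective: faster
-- what changed: A backpatches the already-emitted output string (re-slicing ret[:-1] at every escape, rebuilding the whole string); B never touches emitted output: it holds one pending character, decides raw-vs-escape when the next character arrives, and joins the parts once, making the pass linear.
import Mathlib
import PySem

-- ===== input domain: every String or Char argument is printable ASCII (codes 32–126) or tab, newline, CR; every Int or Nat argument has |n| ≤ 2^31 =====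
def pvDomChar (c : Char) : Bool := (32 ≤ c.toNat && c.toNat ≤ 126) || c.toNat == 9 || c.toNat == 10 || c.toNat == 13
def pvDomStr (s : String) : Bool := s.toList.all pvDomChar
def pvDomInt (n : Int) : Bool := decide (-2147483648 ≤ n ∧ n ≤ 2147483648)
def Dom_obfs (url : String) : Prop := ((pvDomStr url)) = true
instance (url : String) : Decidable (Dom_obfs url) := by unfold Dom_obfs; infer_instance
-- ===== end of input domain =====

-- B replaces A's backpatching of the already-emitted string by deferred emission of a
-- pending character; return values are proved equal on every string (objective: faster; measured).

-- "\\x%x" % ord(c) : backslash, 'x', lowercase hex of the code point (no padding)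
def escChar (c : Char) : List Char := '\\' :: 'x' :: Nat.toDigits 16 c.toNat

-- ===== PORT A =====
-- the for-loop of A over the remaining characters; state (ret, index) as in the Python
def obfsGo : List Char → List Char → Nat → List Char
  | [], ret, _ => ret
  | c :: rest, ret, index =>
    let ret' :=
      if index > 0 ∧ (c = '.' ∨ index % 7 = 3) then
        -- last = ord(ret[-1]); ret = "%s\x%x" % (ret[:-1], last)
        -- (ret[-1] via pyGet?; unreachable 'none' arm keeps ret, index > 0 makes ret nonempty)
        match PySem.List.pyGet? ret (-1) with
        | some last => ret.dropLast ++ escChar last   -- ret[:-1] = dropLast (slice_to_neg_one)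
        | none => ret
      else ret
    obfsGo rest (ret' ++ [c]) (index + 1)

def obfs (url : String) : String := String.mk (obfsGo url.toList [] 0)

-- ===== PORT B =====
-- Source B's loop after the first iteration: `prev` pending, `j` the index of the current char
def obfsAltGo : List Char → Char → Nat → List Char
  | [], prev, _ => [prev]                 -- final 'parts.append(prev)'
  | c :: rest, prev, j =>
    (if c = '.' ∨ j % 7 = 3 then escChar prev else [prev]) ++ obfsAltGo rest c (j + 1)

def obfs_alt (url : String) : String :=
  match url.toList with
  | [] => ""                               -- prev is None: no part emitted
  | c :: rest => String.mk (obfsAltGo rest c 1)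

-- ===== PRECONDITION & SPEC =====
def Spec_obfs (url : String) (out : String) : Prop := out = obfs_alt url
instance (url : String) (out : String) : Decidable (Spec_obfs url out) := by unfold Spec_obfs; infer_instance

-- ===== CLAIM (what is proved, stated in full; the proofs are below) =====
def Claim_equal_obfs : Prop := ∀ (url : String), Dom_obfs url → Spec_obfs url (obfs url)

-- ===== LEMMAS AND PROOFS =====

-- Invariant: with index i+1 > 0 and ret = acc ++ [prev] (prev = previous char, still raw),
-- A's loop computes acc followed by B's deferred emission of prev and the rest.
theorem obfsGo_eq_altGo (cs : List Char) :
    ∀ (acc : List Char) (prev : Char) (i : Nat),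
      obfsGo cs (acc ++ [prev]) (i + 1) = acc ++ obfsAltGo cs prev (i + 1) := by
  induction cs with
  | nil => intro acc prev i; simp [obfsGo, obfsAltGo]
  | cons c rest ih =>
    intro acc prev i
    simp only [obfsGo, obfsAltGo]
    by_cases h : c = '.' ∨ (i + 1) % 7 = 3
    · simp only [h, Nat.succ_pos, true_and, if_pos,
        PySem.List.pyGet?_neg_one_append_singleton, List.dropLast_concat]
      rw [show acc ++ escChar prev ++ [c] = (acc ++ escChar prev) ++ [c] by simp, ih]
      simp
    · simp only [h, and_false, if_neg, not_false_iff]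
      rw [show acc ++ [prev] ++ [c] = (acc ++ [prev]) ++ [c] by simp, ih]
      simp

-- ===== VERDICT (by name: the statement is the Claim_ definition above) =====
theorem obfs_spec : Claim_equal_obfs := by
  intro url _
  unfold Spec_obfs obfs obfs_alt
  cases h : url.toList with
  | nil => simp [obfsGo]; rfl
  | cons c rest =>
    simp only [obfsGo]
    norm_num
    have := obfsGo_eq_altGo rest ([] : List Char) c 0
    rw [show ([c] : List Char) = [] ++ [c] by simp, obfsGo_eq_altGo rest [] c 0]
    simp
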